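-- pv_equiv track=rewrite | github.com/nugh75/orienta_piu | src/utils/constants.py | get_territorio
-- ===== SOURCE A (Python) =====
-- PROVINCE_METROPOLITANE = {
--     "Roma", "Milano", "Napoli", "Torino", "Bari", "Firenze",
--     "Bologna", "Genova", "Venezia", "Palermo", "Catania",
--     "Messina", "Reggio Calabria", "Cagliari"
-- }
--
-- def get_territorio(provincia: str) -> str:
--     """
--     Determina se una provincia è metropolitana o meno.
--
--     Args:
--         provincia: Nome della provincia (es. "Milano", "Benevento")
--
--     Returns:
--         "Metropolitano" o "Non Metropolitano"
--     """
--     if not provincia or provincia in ("ND", "", None):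
--         return "ND"
--
--     # Normalizza per confronto case-insensitive
--     provincia_normalized = provincia.strip().title()
--
--     # Controlla anche varianti
--     if provincia_normalized in PROVINCE_METROPOLITANE:
--         return "Metropolitano"
--
--     # Controlla anche senza accenti o con varianti
--     for metro in PROVINCE_METROPOLITANE:
--         if metro.upper() == provincia_normalized.upper():
--             return "Metropolitano"
--
--     return "Non Metropolitano"
-- ===== SOURCE B (Python) =====
-- PROVINCE_METROPOLITANE = {
--     "Roma", "Milano", "Napoli", "Torino", "Bari", "Firenze",
--     "Bologna", "Genova", "Venezia", "Palermo", "Catania",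
--     "Messina", "Reggio Calabria", "Cagliari"
-- }
--
-- # uppercased metropolitan provinces, sorted lexicographically for binary search
-- _SORTED_METRO = ["BARI", "BOLOGNA", "CAGLIARI", "CATANIA", "FIRENZE", "GENOVA",
--                  "MESSINA", "MILANO", "NAPOLI", "PALERMO", "REGGIO CALABRIA",
--                  "ROMA", "TORINO", "VENEZIA"]
--
--
-- def get_territorio(provincia: str) -> str:
--     if not provincia or provincia in ("ND", "", None):
--         return "ND"
--     key = provincia.strip().upper()
--     # binary search (bisect_left) over the sorted uppercase names
--     lo, hi = 0, len(_SORTED_METRO)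
--     while lo < hi:
--         mid = (lo + hi) // 2
--         if _SORTED_METRO[mid] < key:
--             lo = mid + 1
--         else:
--             hi = mid
--     if lo < len(_SORTED_METRO) and _SORTED_METRO[lo] == key:
--         return "Metropolitano"
--     return "Non Metropolitano"
-- ===== Notes on version B (the rewrite author's own statement) =====
-- stated objective: alternative
-- what changed: B replaces A's title-cased exact set test plus case-insensitive linear scan over the province set with a hand-written bisect_left binary search for the stripped uppercased input over a sorted list of the uppercased province names.
import Mathlib
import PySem

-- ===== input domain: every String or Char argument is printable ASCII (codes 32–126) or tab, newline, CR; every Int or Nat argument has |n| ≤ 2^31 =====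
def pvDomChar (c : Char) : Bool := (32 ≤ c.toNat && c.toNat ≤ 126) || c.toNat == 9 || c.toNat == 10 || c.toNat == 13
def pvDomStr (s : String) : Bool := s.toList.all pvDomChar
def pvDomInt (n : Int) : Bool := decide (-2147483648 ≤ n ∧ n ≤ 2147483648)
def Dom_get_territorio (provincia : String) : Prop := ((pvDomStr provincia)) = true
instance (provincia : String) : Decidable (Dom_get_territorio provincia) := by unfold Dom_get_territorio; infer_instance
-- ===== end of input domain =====

-- B replaces A's title-cased set test plus case-insensitive linear scan by a binary
-- search (bisect_left, hand-written) over a sorted list of the uppercased names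
-- (objective: alternative — binary search instead of normalize-and-scan; a timing run measured B faster).

-- ===== PORT A =====
def PROVINCE_METROPOLITANE : PySem.Set String := PySem.Set.ofList
  ["Roma", "Milano", "Napoli", "Torino", "Bari", "Firenze",
   "Bologna", "Genova", "Venezia", "Palermo", "Catania",
   "Messina", "Reggio Calabria", "Cagliari"]

-- str.title, ported by hand (PySem has no title); exact on the ASCII domain Dom_get_territorio,
-- where Python's "cased" property coincides with isalpha.
def pyTitleGo (prevCased : Bool) : List Char → List Char
  | [] => []
  | c :: rest =>
    (if PySem.Chars.isalpha c then
       (if prevCased then PySem.Chars.lowerChar c else PySem.Chars.upperChar c)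
     else c) :: pyTitleGo (PySem.Chars.isalpha c) rest

def get_territorio (provincia : String) : String :=
  if provincia = "" || provincia = "ND" then "ND"
  else
    let provincia_normalized := String.ofList (pyTitleGo false (PySem.Str.strip provincia).toList)
    if PROVINCE_METROPOLITANE.contains provincia_normalized then "Metropolitano"
    else if PROVINCE_METROPOLITANE.any
        (fun metro => PySem.Str.upper metro == PySem.Str.upper provincia_normalized) then
      "Metropolitano"
    else "Non Metropolitano"

-- ===== PORT B =====
-- the module-level _SORTED_METRO list of Source B
def SORTED_METRO : List String :=
  ["BARI", "BOLOGNA", "CAGLIARI", "CATANIA", "FIRENZE", "GENOVA",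
   "MESSINA", "MILANO", "NAPOLI", "PALERMO", "REGGIO CALABRIA",
   "ROMA", "TORINO", "VENEZIA"]

-- Python's '<' on strings, ported by hand: lexicographic comparison of code points,
-- shorter prefix is smaller; exact for all Unicode strings.
def clLt : List Char → List Char → Bool
  | _, [] => false
  | [], _ :: _ => true
  | a :: as, b :: bs =>
    if a.toNat < b.toNat then true
    else if b.toNat < a.toNat then false
    else clLt as bs

def pyStrLt (a b : String) : Bool := clLt a.toList b.toList

-- the while-loop of Source B (bisect_left); terminates because hi - lo shrinks
def bsLoop (key : String) (lo hi : Nat) : Nat :=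
  if lo < hi then
    let mid := (lo + hi) / 2
    if pyStrLt (SORTED_METRO.getD mid "") key then bsLoop key (mid + 1) hi
    else bsLoop key lo mid
  else lo
termination_by hi - lo
decreasing_by all_goals omega

def get_territorio_alt (provincia : String) : String :=
  if provincia = "" || provincia = "ND" then "ND"
  else
    let key := PySem.Str.upper (PySem.Str.strip provincia)
    let lo := bsLoop key 0 SORTED_METRO.length
    if lo < SORTED_METRO.length && SORTED_METRO.getD lo "" == key then "Metropolitano"
    else "Non Metropolitano"

-- ===== PRECONDITION & SPEC =====
def Spec_get_territorio (provincia : String) (out : String) : Prop := out = get_territorio_alt provincia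
instance (provincia : String) (out : String) : Decidable (Spec_get_territorio provincia out) := by unfold Spec_get_territorio; infer_instance

-- ===== CLAIM (what is proved, stated in full; the proofs are below) =====
def Claim_equal_get_territorio : Prop := ∀ (provincia : String), Dom_get_territorio provincia → Spec_get_territorio provincia (get_territorio provincia)

-- ===== LEMMAS AND PROOFS =====

theorem pvCharLe_iff (a b : Char) : a ≤ b ↔ a.toNat ≤ b.toNat := Iff.rfl

theorem pvUpperChar_lowerChar (c : Char) :
    PySem.Chars.upperChar (PySem.Chars.lowerChar c) = PySem.Chars.upperChar c := by
  unfold PySem.Chars.upperChar PySem.Chars.lowerChar PySem.Chars.islower PySem.Chars.isupper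
  simp only [Bool.and_eq_true, decide_eq_true_eq, pvCharLe_iff]
  have ha : ('A').toNat = 65 := rfl
  have hz : ('Z').toNat = 90 := rfl
  have hla : ('a').toNat = 97 := rfl
  have hlz : ('z').toNat = 122 := rfl
  rw [ha, hz, hla, hlz]
  by_cases h : 65 ≤ c.toNat ∧ c.toNat ≤ 90
  · have hval : (c.toNat + 32).isValidChar := Or.inl (by omega)
    have ht : (Char.ofNat (c.toNat + 32)).toNat = c.toNat + 32 := by
      rw [Char.toNat_ofNat, if_pos hval]
    rw [if_pos h, ht, if_pos (by omega), if_neg (by omega)]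
    have h32 : c.toNat + 32 - 32 = c.toNat := by omega
    rw [h32, Char.ofNat_toNat]
  · rw [if_neg h]

theorem pvUpperChar_upperChar (c : Char) :
    PySem.Chars.upperChar (PySem.Chars.upperChar c) = PySem.Chars.upperChar c := by
  unfold PySem.Chars.upperChar PySem.Chars.islower
  simp only [Bool.and_eq_true, decide_eq_true_eq, pvCharLe_iff]
  have hla : ('a').toNat = 97 := rfl
  have hlz : ('z').toNat = 122 := rfl
  rw [hla, hlz]
  by_cases h : 97 ≤ c.toNat ∧ c.toNat ≤ 122
  · have hval : (c.toNat - 32).isValidChar := Or.inl (by omega)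
    have ht : (Char.ofNat (c.toNat - 32)).toNat = c.toNat - 32 := by
      rw [Char.toNat_ofNat, if_pos hval]
    rw [if_pos h, ht, if_neg (by omega)]
  · rw [if_neg h, if_neg h]

-- uppercasing erases whatever case changes title made
theorem pvUpper_pyTitleGo (b : Bool) (cs : List Char) :
    PySem.Chars.upper (pyTitleGo b cs) = PySem.Chars.upper cs := by
  induction cs generalizing b with
  | nil => rfl
  | cons c rest ih =>
    simp only [pyTitleGo, PySem.Chars.upper, List.map_cons] at *
    rw [ih]
    congr 1
    split_ifs with h1 h2
    · exact pvUpperChar_lowerChar c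
    · exact pvUpperChar_upperChar c
    · rfl

theorem pvUpper_norm (cs : List Char) :
    PySem.Str.upper (String.ofList (pyTitleGo false cs)) = PySem.Str.upper (String.ofList cs) := by
  rw [String.ext_iff, PySem.Str.toList_upper, PySem.Str.toList_upper,
      String.toList_ofList, String.toList_ofList]
  exact pvUpper_pyTitleGo false cs

theorem pvSetContains_iff {α : Type} [BEq α] [LawfulBEq α] (st : PySem.Set α) (x : α) :
    st.contains x = true ↔ x ∈ st := by
  simp [PySem.Set.contains]

theorem pvStrip_ofList (s : String) :
    String.ofList (PySem.Str.strip s).toList = PySem.Str.strip s := by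
  rw [String.ext_iff, String.toList_ofList]

-- A's result, reduced to one membership test in the uppercased names
theorem pvA_eq_mem (provincia : String) (hg : ¬ (provincia = "" || provincia = "ND") = true) :
    get_territorio provincia =
      (if PySem.Str.upper (PySem.Str.strip provincia) ∈ PROVINCE_METROPOLITANE.map PySem.Str.upper
       then "Metropolitano" else "Non Metropolitano") := by
  unfold get_territorio
  rw [if_neg hg]
  have hu : PySem.Str.upper (String.ofList (pyTitleGo false (PySem.Str.strip provincia).toList))
      = PySem.Str.upper (PySem.Str.strip provincia) := by
    rw [pvUpper_norm, pvStrip_ofList]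
  by_cases hmem : PySem.Str.upper (PySem.Str.strip provincia)
      ∈ PROVINCE_METROPOLITANE.map PySem.Str.upper
  · rw [if_pos hmem]
    have hany : PROVINCE_METROPOLITANE.any (fun metro => PySem.Str.upper metro
        == PySem.Str.upper (String.ofList
            (pyTitleGo false (PySem.Str.strip provincia).toList))) = true := by
      rcases List.mem_map.mp hmem with ⟨m, hm, he⟩
      refine List.any_eq_true.mpr ⟨m, hm, ?_⟩
      rw [beq_iff_eq, hu, he]
    by_cases hc : PROVINCE_METROPOLITANE.contains
        (String.ofList (pyTitleGo false (PySem.Str.strip provincia).toList)) = true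
    · rw [if_pos hc]
    · rw [if_neg hc, if_pos hany]
  · rw [if_neg hmem]
    have hc : ¬ PROVINCE_METROPOLITANE.contains
        (String.ofList (pyTitleGo false (PySem.Str.strip provincia).toList)) = true := by
      intro hcon
      have hn := (pvSetContains_iff _ _).mp hcon
      exact hmem (hu ▸ List.mem_map.mpr ⟨_, hn, rfl⟩)
    rw [if_neg hc]
    have hany : ¬ PROVINCE_METROPOLITANE.any (fun metro => PySem.Str.upper metro
        == PySem.Str.upper (String.ofList
            (pyTitleGo false (PySem.Str.strip provincia).toList))) = true := by
      intro hcon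
      rcases List.any_eq_true.mp hcon with ⟨m, hm, he⟩
      rw [beq_iff_eq, hu] at he
      exact hmem (List.mem_map.mpr ⟨m, hm, he⟩)
    rw [if_neg hany]

-- order facts about the hand-ported string comparison
theorem pvClLt_irrefl : ∀ a, clLt a a = false := by
  intro a
  induction a with
  | nil => rfl
  | cons c cs ih => simp [clLt, ih]

theorem pvClLt_trans : ∀ a b c, clLt a b = true → clLt b c = true → clLt a c = true := by
  intro a
  induction a with
  | nil =>
    intro b c hab hbc
    cases c with
    | nil => cases b <;> simp [clLt] at hab hbc
    | cons x xs => simp [clLt]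
  | cons x xs ih =>
    intro b c hab hbc
    cases b with
    | nil => simp [clLt] at hab
    | cons y ys =>
      cases c with
      | nil => simp [clLt] at hbc
      | cons z zs =>
        simp only [clLt] at hab hbc ⊢
        split_ifs at hab hbc ⊢ with h1 h2 h3 h4 h5 h6 <;> try rfl
        all_goals try omega
        all_goals exact ih ys zs hab hbc

theorem pvStrLt_irrefl (a : String) : pyStrLt a a = false := pvClLt_irrefl a.toList

theorem pvStrLt_trans (a b c : String) (hab : pyStrLt a b = true) (hbc : pyStrLt b c = true) :
    pyStrLt a c = true := pvClLt_trans a.toList b.toList c.toList hab hbc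

-- SORTED_METRO is strictly increasing under the ported '<'
theorem pvSorted_getD : ∀ j, j < 14 → ∀ i, i < j →
    pyStrLt (SORTED_METRO.getD i "") (SORTED_METRO.getD j "") = true := by decide

-- bisect_left invariant: below lo everything is < key, from hi on nothing is < key;
-- at the end the success test is exactly membership of key
theorem pvBs_mem (key : String) : ∀ (n lo hi : Nat), hi - lo = n → lo ≤ hi → hi ≤ 14 →
    (∀ i, i < lo → pyStrLt (SORTED_METRO.getD i "") key = true) →
    (∀ i, hi ≤ i → i < 14 → pyStrLt (SORTED_METRO.getD i "") key = false) →
    ((decide (bsLoop key lo hi < 14) && (SORTED_METRO.getD (bsLoop key lo hi) "" == key)) = true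
      ↔ key ∈ SORTED_METRO) := by
  intro n
  induction n using Nat.strong_induction_on with
  | _ n ih =>
    intro lo hi hn hlh hh14 hlo hhi
    by_cases h : lo < hi
    · rw [bsLoop, if_pos h]
      by_cases hc : pyStrLt (SORTED_METRO.getD ((lo + hi) / 2) "") key = true
      · simp only [hc, if_pos]
        refine ih (hi - ((lo + hi) / 2 + 1)) (by omega) ((lo + hi) / 2 + 1) hi (by omega)
          (by omega) hh14 ?_ hhi
        intro i hi'
        by_cases hil : i < lo
        · exact hlo i hil
        · by_cases hie : i = (lo + hi) / 2
          · exact hie ▸ hc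
          · exact pvStrLt_trans _ _ _ (pvSorted_getD ((lo + hi) / 2) (by omega) i (by omega)) hc
      · simp only [hc, if_neg, Bool.false_eq_true, not_false_eq_true]
        refine ih ((lo + hi) / 2 - lo) (by omega) lo ((lo + hi) / 2) (by omega)
          (by omega) (by omega) hlo ?_
        intro i hi' hi14
        by_cases hie : i = (lo + hi) / 2
        · subst hie; exact Bool.eq_false_iff.mpr hc
        · by_cases hhi' : hi ≤ i
          · exact hhi i hhi' hi14
          · refine Bool.eq_false_iff.mpr fun hcon => ?_
            exact hc (pvStrLt_trans _ _ _
              (pvSorted_getD i hi14 ((lo + hi) / 2) (by omega)) hcon)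
    · rw [bsLoop, if_neg h]
      have hle : lo = hi := by omega
      constructor
      · intro hres
        simp only [Bool.and_eq_true, decide_eq_true_eq, beq_iff_eq] at hres
        obtain ⟨hlt, h2⟩ := hres
        have hlen : lo < SORTED_METRO.length := hlt
        rw [List.getD_eq_getElem SORTED_METRO "" hlen] at h2
        exact h2 ▸ List.getElem_mem hlen
      · intro hmem
        rcases List.mem_iff_getElem.mp hmem with ⟨i, hilen, hieq⟩
        have h14 : (SORTED_METRO.length : Nat) = 14 := rfl
        have hi14 : i < 14 := by omega
        have hgd : SORTED_METRO.getD i "" = key := by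
          rw [List.getD_eq_getElem SORTED_METRO "" hilen]; exact hieq
        have hige : ¬ i < lo := by
          intro hcon
          have := hlo i hcon
          rw [hgd] at this
          exact absurd this (by simp [pvStrLt_irrefl])
        have hieqlo : i = lo := by
          rcases Nat.lt_or_ge lo i with hlt | hge
          · have hs := pvSorted_getD i hi14 lo hlt
            rw [hgd] at hs
            have hf := hhi lo (by omega) (by omega)
            rw [hf] at hs
            cases hs
          · omega
        simp only [Bool.and_eq_true, decide_eq_true_eq, beq_iff_eq]
        exact ⟨by omega, by rw [← hieqlo, hgd]⟩

-- ===== VERDICT (by name: the statement is the Claim_ definition above) =====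
theorem get_territorio_spec : Claim_equal_get_territorio := by
  intro provincia _
  unfold Spec_get_territorio
  by_cases hg : (provincia = "" || provincia = "ND") = true
  · unfold get_territorio get_territorio_alt
    rw [if_pos hg, if_pos hg]
  · rw [pvA_eq_mem provincia hg]
    unfold get_territorio_alt
    rw [if_neg hg]
    have hperm : (PROVINCE_METROPOLITANE.map PySem.Str.upper).Perm SORTED_METRO := by decide
    have hmem_iff : PySem.Str.upper (PySem.Str.strip provincia)
        ∈ PROVINCE_METROPOLITANE.map PySem.Str.upper
        ↔ PySem.Str.upper (PySem.Str.strip provincia) ∈ SORTED_METRO := hperm.mem_iff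
    have hbs := pvBs_mem (PySem.Str.upper (PySem.Str.strip provincia)) 14 0 14 rfl
      (by omega) (by omega) (by omega) (by intro i h1 h2; omega)
    by_cases hmem : PySem.Str.upper (PySem.Str.strip provincia)
        ∈ PROVINCE_METROPOLITANE.map PySem.Str.upper
    · rw [if_pos hmem]
      have : (decide (bsLoop (PySem.Str.upper (PySem.Str.strip provincia)) 0 14 < 14) &&
          (SORTED_METRO.getD (bsLoop (PySem.Str.upper (PySem.Str.strip provincia)) 0 14) ""
            == PySem.Str.upper (PySem.Str.strip provincia))) = true :=
        hbs.mpr (hmem_iff.mp hmem)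
      simp only [SORTED_METRO, List.length_cons, List.length_nil] at *
      rw [if_pos (by exact this)]
    · rw [if_neg hmem]
      have : ¬ (decide (bsLoop (PySem.Str.upper (PySem.Str.strip provincia)) 0 14 < 14) &&
          (SORTED_METRO.getD (bsLoop (PySem.Str.upper (PySem.Str.strip provincia)) 0 14) ""
            == PySem.Str.upper (PySem.Str.strip provincia))) = true :=
        fun hcon => hmem (hmem_iff.mpr (hbs.mp hcon))
      simp only [SORTED_METRO, List.length_cons, List.length_nil] at *
      rw [if_neg (by exact this)]
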